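-- pv_equiv track=rewrite | github.com/miczho/competitive-coding | src/kick-start-21-b-1.py | increaseSubstr
-- ===== SOURCE A (Python) =====
-- def increaseSubstr(n, s):
--     ans = [1]
--     for i in range(1, n):
--         if s[i-1] < s[i]:
--             ans.append(ans[-1]+1)
--         else:
--             ans.append(1)
--
--     return ans
-- ===== SOURCE B (Python) =====
-- def increaseSubstr(n, s):
--     # positions where a new increasing run starts (the order breaks there)
--     breaks = [i for i in range(1, n) if not (s[i-1] < s[i])]
--     # the first position always has run length 1; after each break the count
--     # restarts at 1, and between breaks it continues 2, 3, ...
--     ans = [1]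
--     prev = 0
--     for b in breaks:
--         ans.extend(range(2, b - prev + 1))
--         ans.append(1)
--         prev = b
--     ans.extend(range(2, n - prev + 1))
--     return ans
-- ===== Notes on version B (the rewrite author's own statement) =====
-- stated objective: alternative
-- what changed: Replaces the single accumulator loop (each entry = previous + 1 or reset) by a two-pass segment decomposition: first collect the breakpoint positions where the increasing order fails, then emit each run's counts 1,2,...,L segment by segment.
import Mathlib
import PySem

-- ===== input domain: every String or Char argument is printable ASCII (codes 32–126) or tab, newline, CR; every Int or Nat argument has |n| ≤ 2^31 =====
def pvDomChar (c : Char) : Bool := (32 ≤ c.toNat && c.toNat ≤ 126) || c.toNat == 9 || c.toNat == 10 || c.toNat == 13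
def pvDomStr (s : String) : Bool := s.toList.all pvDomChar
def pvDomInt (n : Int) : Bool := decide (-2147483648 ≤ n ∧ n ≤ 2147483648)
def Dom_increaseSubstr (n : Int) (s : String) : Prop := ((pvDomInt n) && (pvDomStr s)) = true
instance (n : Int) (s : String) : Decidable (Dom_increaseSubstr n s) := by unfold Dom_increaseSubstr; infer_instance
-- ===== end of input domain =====

-- B replaces A's running-accumulator loop by a two-pass segment decomposition (collect the
-- breakpoints, then emit each run's counts segment by segment); alternative structure, same O(n) cost.

-- ===== PORT A =====
def increaseSubstr (n : Int) (s : String) : List Int :=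
  (PySem.List.pyRange 1 n 1).foldl
    (fun ans i =>
      if (PySem.Str.pyGet? s (i-1)).getD ' ' < (PySem.Str.pyGet? s i).getD ' ' then
        ans ++ [PySem.List.pyGetD ans (-1) 0 + 1]
      else
        ans ++ [1])
    [1]

-- ===== PORT B =====
def increaseSubstr_alt (n : Int) (s : String) : List Int :=
  let breaks :=
    (PySem.List.pyRange 1 n 1).foldl
      (fun bs i =>
        if ¬ ((PySem.Str.pyGet? s (i-1)).getD ' ' < (PySem.Str.pyGet? s i).getD ' ') then
          bs ++ [i]
        else bs)
      []
  let st := breaks.foldl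
    (fun (st : List Int × Int) b =>
      (st.1 ++ PySem.List.pyRange 2 (b - st.2 + 1) 1 ++ [1], b))
    ([1], 0)
  st.1 ++ PySem.List.pyRange 2 (n - st.2 + 1) 1

-- ===== PRECONDITION & SPEC =====
-- Pre_ excludes exactly the inputs where Python A raises IndexError: for n ≥ 2 it reads s[0..n-1],
-- so n must not exceed len(s); for n ≤ 1 the loop body never runs and A returns without indexing.
def Pre_increaseSubstr (n : Int) (s : String) : Prop := n ≤ 1 ∨ n ≤ (s.length : Int)
instance (n : Int) (s : String) : Decidable (Pre_increaseSubstr n s) := by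
  unfold Pre_increaseSubstr; infer_instance
def pvWitness_increaseSubstr : Int × String := (3, "abc")

def Spec_increaseSubstr (n : Int) (s : String) (out : List Int) : Prop :=
  out = increaseSubstr_alt n s
instance (n : Int) (s : String) (out : List Int) : Decidable (Spec_increaseSubstr n s out) := by
  unfold Spec_increaseSubstr; infer_instance


-- ===== CLAIM (what is proved, stated in full; the proofs are below) =====
def Claim_equal_increaseSubstr : Prop := ∀ (n : Int) (s : String), Dom_increaseSubstr n s → Pre_increaseSubstr n s → Spec_increaseSubstr n s (increaseSubstr n s)

-- ===== LEMMAS AND PROOFS =====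

-- Abstract versions of the loops, parameterised by the comparison predicate.
def pvA (lt : Int → Prop) [DecidablePred lt] (m : Int) : List Int :=
  (PySem.List.pyRange 1 m 1).foldl
    (fun ans i => if lt i then ans ++ [PySem.List.pyGetD ans (-1) 0 + 1] else ans ++ [1]) [1]

def pvS (lt : Int → Prop) [DecidablePred lt] (m : Int) : List Int :=
  (PySem.List.pyRange 1 m 1).foldl
    (fun st i => if ¬ lt i then st ++ [i] else st) [0]

def pvSeg (p : Int × Int) : List Int := PySem.List.pyRange 1 (p.2 - p.1 + 1) 1

def pvPairs (xs : List Int) : List (Int × Int) := xs.zip xs.tail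

lemma pvPairs_append_singleton (xs : List Int) (y : Int) (h : xs ≠ []) :
    pvPairs (xs ++ [y]) = pvPairs xs ++ [(xs.getLast h, y)] := by
  induction xs with
  | nil => exact absurd rfl h
  | cons a t ih =>
    cases t with
    | nil => simp [pvPairs]
    | cons b t' =>
      have := ih (by simp)
      simp only [pvPairs, List.cons_append, List.zip_cons_cons, List.tail_cons] at this ⊢
      rw [List.getLast_cons (by simp)]
      simp [this]

lemma pvA_succ (lt : Int → Prop) [DecidablePred lt] (m : Int) (hm : 1 ≤ m) :
    pvA lt (m+1) = if lt m then pvA lt m ++ [PySem.List.pyGetD (pvA lt m) (-1) 0 + 1]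
      else pvA lt m ++ [1] := by
  rw [pvA, PySem.List.pyRange_one_succ_right hm, List.foldl_append]
  simp only [List.foldl_cons, List.foldl_nil]
  rfl

lemma pvS_succ (lt : Int → Prop) [DecidablePred lt] (m : Int) (hm : 1 ≤ m) :
    pvS lt (m+1) = if ¬ lt m then pvS lt m ++ [m] else pvS lt m := by
  rw [pvS, PySem.List.pyRange_one_succ_right hm, List.foldl_append]
  simp only [List.foldl_cons, List.foldl_nil]
  rfl

lemma pvMain (lt : Int → Prop) [DecidablePred lt] (m : Int) (h : 1 ≤ m) :
    pvS lt m ≠ [] ∧ (∀ x ∈ pvS lt m, x < m) ∧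
      pvA lt m = (pvPairs (pvS lt m ++ [m])).flatMap pvSeg := by
  induction m, h using Int.le_induction with
  | base =>
    refine ⟨by simp [pvS, PySem.List.pyRange_one_eq_nil (by omega : (1:Int) ≤ 1)], ?_, ?_⟩
    · simp [pvS, PySem.List.pyRange_one_eq_nil (by omega : (1:Int) ≤ 1)]
    · simp [pvA, pvS, pvPairs, pvSeg, PySem.List.pyRange_one_eq_nil (by omega : (1:Int) ≤ 1)]
      decide
  | succ m hm ih =>
    obtain ⟨hne, hlt, heq⟩ := ih
    set l := (pvS lt m).getLast hne with hl
    have hlm : l < m := hlt l (List.getLast_mem hne)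
    by_cases hc : lt m
    · -- run continues: starts unchanged, A appends last+1
      have hS : pvS lt (m+1) = pvS lt m := by
        rw [pvS_succ lt m hm, if_neg (by simpa using hc)]
      have hpairs_m : pvPairs (pvS lt m ++ [m]) = pvPairs (pvS lt m) ++ [(l, m)] :=
        pvPairs_append_singleton _ _ hne
      have hpairs_m1 : pvPairs (pvS lt m ++ [m+1]) = pvPairs (pvS lt m) ++ [(l, m+1)] :=
        pvPairs_append_singleton _ _ hne
      have hseg : pvSeg (l, m+1) = pvSeg (l, m) ++ [m - l + 1] := by
        have h3 : m + 1 - l + 1 = (m - l + 1) + 1 := by ring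
        simp only [pvSeg, h3]
        exact PySem.List.pyRange_one_succ_right (by omega)
      have hsegm : pvSeg (l, m) = PySem.List.pyRange 1 (m - l) 1 ++ [m - l] := by
        simp only [pvSeg]
        exact PySem.List.pyRange_one_succ_right (by omega)
      have hAm : pvA lt m = ((pvPairs (pvS lt m)).flatMap pvSeg ++
          PySem.List.pyRange 1 (m - l) 1) ++ [m - l] := by
        rw [heq, hpairs_m, List.flatMap_append]
        simp [hsegm]
      have hlast : PySem.List.pyGetD (pvA lt m) (-1) 0 = m - l := by
        rw [hAm]; exact PySem.List.pyGetD_neg_one_append_singleton _ _ _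
      refine ⟨hS ▸ hne, ?_, ?_⟩
      · intro x hx; rw [hS] at hx; exact lt_trans (hlt x hx) (by omega)
      · rw [pvA_succ lt m hm, if_pos hc, hlast, hS, hpairs_m1, List.flatMap_append]
        rw [heq, hpairs_m, List.flatMap_append]
        simp [hseg]
    · -- breakpoint at m: starts gains m, A appends 1
      have hS : pvS lt (m+1) = pvS lt m ++ [m] := by
        rw [pvS_succ lt m hm, if_pos hc]
      have hpairs : pvPairs ((pvS lt m ++ [m]) ++ [m+1]) =
          pvPairs (pvS lt m ++ [m]) ++ [(m, m+1)] := by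
        rw [pvPairs_append_singleton (pvS lt m ++ [m]) (m+1) (by simp)]
        simp
      refine ⟨by simp [hS], ?_, ?_⟩
      · intro x hx; rw [hS] at hx
        rcases List.mem_append.mp hx with hx | hx
        · exact lt_trans (hlt x hx) (by omega)
        · simp at hx; omega
      · rw [pvA_succ lt m hm, if_neg hc, hS, hpairs, List.flatMap_append, ← heq]
        have : pvSeg (m, m+1) = [1] := by
          have h2 : m + 1 - m + 1 = (1:Int) + 1 := by ring
          simp only [pvSeg, h2]
          decide
        simp [this]

-- B-side: the per-breakpoint emission step, and its characterisation.
def pvG : (List Int × Int) → Int → (List Int × Int) :=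
  fun st b => (st.1 ++ PySem.List.pyRange 2 (b - st.2 + 1) 1 ++ [1], b)

lemma pvSeg_cons (p q : Int) (h : p < q) :
    pvSeg (p, q) = 1 :: PySem.List.pyRange 2 (q - p + 1) 1 := by
  rw [pvSeg]
  have := PySem.List.pyRange_one_cons (show (1:Int) < q - p + 1 by omega)
  simpa using this

lemma pvKey (F : List Int) (p q : Int) (ans : List Int)
    (h : List.Pairwise (· < ·) (p :: (F ++ [q]))) :
    (F.foldl pvG (ans ++ [1], p)).1 ++
      PySem.List.pyRange 2 (q - (F.foldl pvG (ans ++ [1], p)).2 + 1) 1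
    = ans ++ (pvPairs ((p :: F) ++ [q])).flatMap pvSeg := by
  induction F generalizing p ans with
  | nil =>
    have hpq : p < q := by
      have := (List.pairwise_cons.mp h).1 q (by simp)
      simpa using this
    simp only [List.foldl_nil]
    have hp : pvPairs ((p :: ([] : List Int)) ++ [q]) = [(p, q)] := by simp [pvPairs]
    rw [hp]
    simp [pvSeg_cons p q hpq]
  | cons b F ih =>
    have hpb : p < b := by
      have := (List.pairwise_cons.mp h).1 b (by simp)
      simpa using this
    have hstep : pvG (ans ++ [1], p) b = ((ans ++ pvSeg (p, b)) ++ [1], b) := by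
      rw [pvG, pvSeg_cons p b hpb]; simp
    have htail : List.Pairwise (· < ·) (b :: (F ++ [q])) := by
      have := (List.pairwise_cons.mp h).2
      simpa using this
    have hp : pvPairs ((p :: b :: F) ++ [q]) = (p, b) :: pvPairs ((b :: F) ++ [q]) := by
      simp [pvPairs]
    rw [List.foldl_cons, hstep, ih b (ans ++ pvSeg (p, b)) htail, hp]
    simp

lemma portA_eq (n : Int) (s : String) :
    increaseSubstr n s =
      pvA (fun i => (PySem.Str.pyGet? s (i-1)).getD ' ' < (PySem.Str.pyGet? s i).getD ' ') n := rfl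

lemma portB_eq (n : Int) (s : String) :
    increaseSubstr_alt n s =
      (let F := (PySem.List.pyRange 1 n 1).filter
          (fun i => decide (¬ ((PySem.Str.pyGet? s (i-1)).getD ' ' < (PySem.Str.pyGet? s i).getD ' ')))
       let st := F.foldl pvG ([1], 0)
       st.1 ++ PySem.List.pyRange 2 (n - st.2 + 1) 1) := by
  rw [increaseSubstr_alt]
  rw [PySem.List.foldl_append_ite_eq_filter]
  rfl

lemma pvS_eq_filter (lt : Int → Prop) [DecidablePred lt] (n : Int) :
    pvS lt n = 0 :: (PySem.List.pyRange 1 n 1).filter (fun i => decide (¬ lt i)) := by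
  rw [pvS, PySem.List.foldl_append_ite_eq_filter]
  rfl

lemma pvB_main (lt : Int → Prop) [DecidablePred lt] (n : Int) (hn : 1 ≤ n) :
    pvA lt n =
      (let F := (PySem.List.pyRange 1 n 1).filter (fun i => decide (¬ lt i))
       let st := F.foldl pvG ([1], 0)
       st.1 ++ PySem.List.pyRange 2 (n - st.2 + 1) 1) := by
  simp only []
  set F := (PySem.List.pyRange 1 n 1).filter (fun i => decide (¬ lt i)) with hF
  have hmemF : ∀ x ∈ F, 1 ≤ x ∧ x < n := by
    intro x hx
    exact PySem.List.mem_pyRange_one.mp (List.mem_of_mem_filter hx)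
  have hpairF : List.Pairwise (· < ·) F :=
    (PySem.List.pairwise_lt_pyRange_one 1 n).filter _
  have hchain : List.Pairwise (· < ·) ((0 : Int) :: (F ++ [n])) := by
    refine List.pairwise_cons.mpr ⟨?_, ?_⟩
    · intro x hx
      rcases List.mem_append.mp hx with hx | hx
      · exact lt_of_lt_of_le (by omega) (hmemF x hx).1
      · simp at hx; omega
    · refine List.pairwise_append.mpr ⟨hpairF, by simp, ?_⟩
      intro x hx y hy
      simp at hy; subst hy
      exact (hmemF x hx).2
  have hB := pvKey F 0 n [] hchain
  simp only [List.nil_append] at hB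
  rw [hB, (pvMain lt n hn).2.2, pvS_eq_filter lt n, ← hF]

-- ===== VERDICT (by name: the statement is the Claim_ definition above) =====
theorem increaseSubstr_spec : Claim_equal_increaseSubstr := by
  intro n s _ _
  show increaseSubstr n s = increaseSubstr_alt n s
  by_cases hn : 1 ≤ n
  · rw [portA_eq, portB_eq]
    exact pvB_main _ n hn
  · rw [portA_eq, portB_eq]
    have h1 : PySem.List.pyRange 1 n 1 = [] := PySem.List.pyRange_one_eq_nil (by omega)
    have h2 : PySem.List.pyRange 2 (n + 1) 1 = [] := PySem.List.pyRange_one_eq_nil (by omega)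
    simp [pvA, h1, h2]
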